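-- pv_equiv track=rewrite | github.com/MVPavan/agentic-video-rag | src/agentic_video_rag/adapters.py | _contiguous_spans
-- ===== SOURCE A (Python) =====
-- def _contiguous_spans(timestamps: list[int]) -> list[tuple[int, int]]:
--     """Build contiguous integer spans from sorted timestamps."""
--
--     if not timestamps:
--         return []
--
--     sorted_ts = sorted(set(timestamps))
--     spans: list[tuple[int, int]] = []
--     start = sorted_ts[0]
--     end = sorted_ts[0]
--
--     for value in sorted_ts[1:]:
--         if value == end + 1:
--             end = value
--             continue
--         spans.append((start, end))
--         start = value
--         end = value
--
--     spans.append((start, end))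
--     return spans
-- ===== SOURCE B (Python) =====
-- def _contiguous_spans(timestamps: list[int]) -> list[tuple[int, int]]:
--     """Build contiguous integer spans from sorted timestamps."""
--     if not timestamps:
--         return []
--     ts = sorted(set(timestamps))
--     spans: list[tuple[int, int]] = []
--     while ts:
--         # peel the leading contiguous run off ts
--         end = ts[0]
--         j = 1
--         while j < len(ts) and ts[j] == end + 1:
--             end = ts[j]
--             j += 1
--         spans.append((ts[0], end))
--         ts = ts[j:]
--     return spans
-- ===== Notes on version B (the rewrite author's own statement) =====
-- stated objective: alternative
-- what changed: Replaced A's single element-at-a-time loop carrying (spans, start, end) state by a run-at-a-time decomposition: an outer loop that peels the whole leading contiguous run off the sorted-deduplicated list (inner scan + slice) and emits one span per iteration.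
import Mathlib
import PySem

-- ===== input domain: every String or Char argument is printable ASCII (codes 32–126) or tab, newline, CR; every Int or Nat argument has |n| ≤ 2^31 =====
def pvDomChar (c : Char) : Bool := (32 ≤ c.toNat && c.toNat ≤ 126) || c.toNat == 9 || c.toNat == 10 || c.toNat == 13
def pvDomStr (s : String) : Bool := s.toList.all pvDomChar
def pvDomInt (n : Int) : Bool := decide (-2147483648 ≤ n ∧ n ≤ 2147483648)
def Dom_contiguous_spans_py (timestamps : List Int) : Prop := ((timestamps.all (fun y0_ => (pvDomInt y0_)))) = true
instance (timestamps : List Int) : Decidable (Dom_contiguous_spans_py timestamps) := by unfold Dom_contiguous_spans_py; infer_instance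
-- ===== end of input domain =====

-- B replaces A's accumulator loop (spans, start, end) by a recursion that peels the leading
-- contiguous run off the sorted-deduplicated list; alternative decomposition, same cost.

-- ===== PORT A =====
def contiguous_spans_py (timestamps : List Int) : List (Int × Int) :=
  if timestamps = [] then []
  else
    match PySem.List.sorted (PySem.Set.ofList timestamps) (fun x => x) false with
    | [] => []  -- unreachable: sorted(set(..)) of a nonempty list is nonempty
    | h :: t =>
      let r := t.foldl
        (fun (acc : List (Int × Int) × Int × Int) value =>
          if value = acc.2.2 + 1 then (acc.1, acc.2.1, value)
          else (acc.1 ++ [(acc.2.1, acc.2.2)], value, value))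
        ([], h, h)
      r.1 ++ [(r.2.1, r.2.2)]

-- ===== PORT B =====
-- the inner while loop: walk the run, returning (end, ts[j:])
def spanTake (e : Int) (ts : List Int) : Int × List Int :=
  match ts with
  | [] => (e, [])
  | v :: rest => if v = e + 1 then spanTake v rest else (e, v :: rest)

theorem spanTake_len (e : Int) (ts : List Int) : (spanTake e ts).2.length ≤ ts.length := by
  induction ts generalizing e with
  | nil => simp [spanTake]
  | cons v rest ih =>
    simp only [spanTake]
    split
    · exact le_trans (ih v) (by simp)
    · simp

-- outer while loop: peel the leading contiguous run, continue on the remainder ts[j:]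
def spansLoop (ts : List Int) (spans : List (Int × Int)) : List (Int × Int) :=
  match ts with
  | [] => spans
  | h :: t => spansLoop (spanTake h t).2 (spans ++ [(h, (spanTake h t).1)])
termination_by ts.length
decreasing_by
  have := spanTake_len h t
  simp
  omega

def contiguous_spans_py_alt (timestamps : List Int) : List (Int × Int) :=
  if timestamps = [] then []
  else spansLoop (PySem.List.sorted (PySem.Set.ofList timestamps) (fun x => x) false) []

-- ===== PRECONDITION & SPEC =====
def Spec_contiguous_spans_py (timestamps : List Int) (out : List (Int × Int)) : Prop := out = contiguous_spans_py_alt timestamps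
instance (timestamps : List Int) (out : List (Int × Int)) : Decidable (Spec_contiguous_spans_py timestamps out) := by unfold Spec_contiguous_spans_py; infer_instance

-- ===== CLAIM (what is proved, stated in full; the proofs are below) =====
def Claim_equal_contiguous_spans_py : Prop := ∀ (timestamps : List Int), Dom_contiguous_spans_py timestamps → Spec_contiguous_spans_py timestamps (contiguous_spans_py timestamps)

-- ===== LEMMAS AND PROOFS =====

-- proof-side recursive characterisation of B's peeling loop (no accumulator)
def spansRec (ts : List Int) : List (Int × Int) :=
  match ts with
  | [] => []
  | h :: t => (h, (spanTake h t).1) :: spansRec (spanTake h t).2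
termination_by ts.length
decreasing_by
  have := spanTake_len h t
  simp
  omega

theorem spansLoop_eq (ts : List Int) : ∀ (spans : List (Int × Int)),
    spansLoop ts spans = spans ++ spansRec ts := by
  induction ts using spansRec.induct with
  | case1 => intro spans; simp [spansLoop, spansRec]
  | case2 h t ih =>
    intro spans
    rw [spansLoop, spansRec, ih]
    simp

-- A's loop, run from state (spans, s, e), appends exactly the spans B's recursion produces:
-- the first emitted span is (s, end-of-run continuing e), and the rest is spansRec of the remainder.
theorem loopA_eq_spansRec (t : List Int) : ∀ (spans : List (Int × Int)) (s e : Int),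
    (let r := t.foldl
        (fun (acc : List (Int × Int) × Int × Int) value =>
          if value = acc.2.2 + 1 then (acc.1, acc.2.1, value)
          else (acc.1 ++ [(acc.2.1, acc.2.2)], value, value))
        (spans, s, e)
     r.1 ++ [(r.2.1, r.2.2)])
    = spans ++ (s, (spanTake e t).1) :: spansRec (spanTake e t).2 := by
  induction t with
  | nil => intro spans s e; simp [spanTake, spansRec]
  | cons v rest ih =>
    intro spans s e
    simp only [List.foldl_cons]
    by_cases hv : v = e + 1
    · rw [if_pos hv]
      have h1 : spanTake e (v :: rest) = spanTake v rest := by simp [spanTake, hv]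
      rw [h1]
      exact ih spans s v
    · simp only [if_neg hv]
      have := ih (spans ++ [(s, e)]) v v
      simp only [this, spanTake, if_neg hv]
      rw [spansRec]
      simp

-- ===== VERDICT (by name: the statement is the Claim_ definition above) =====
theorem contiguous_spans_py_spec : Claim_equal_contiguous_spans_py := by
  intro timestamps _
  unfold Spec_contiguous_spans_py contiguous_spans_py contiguous_spans_py_alt
  by_cases hts : timestamps = []
  · simp [hts]
  · simp only [if_neg hts]
    cases hs : PySem.List.sorted (PySem.Set.ofList timestamps) (fun x => x) false with
    | nil => rw [spansLoop]
    | cons h t =>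
      have := loopA_eq_spansRec t [] h h
      simp only [this]
      rw [spansLoop_eq, spansRec]
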